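-- pv_equiv track=rewrite | github.com/felis2803/tables | archive/scripts/find_forced_bits_no_sat.py | join_project_bit
-- ===== SOURCE A (Python) =====
-- from collections import Counter, defaultdict, deque
--
-- def join_project_bit(
--     bits1: tuple[int, ...],
--     rows1: set[int],
--     bits2: tuple[int, ...],
--     rows2: set[int],
--     removed_bit: int,
-- ) -> tuple[tuple[int, ...], set[int]]:
--     index1 = {bit: offset for offset, bit in enumerate(bits1)}
--     index2 = {bit: offset for offset, bit in enumerate(bits2)}
--     common_bits = sorted(set(bits1) & set(bits2))
--     common_offsets1 = [index1[bit] for bit in common_bits]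
--     common_offsets2 = [index2[bit] for bit in common_bits]
--     buckets: dict[int, list[int]] = defaultdict(list)
--
--     for row2 in rows2:
--         key = 0
--         for position, offset in enumerate(common_offsets2):
--             key |= ((row2 >> offset) & 1) << position
--         buckets[key].append(row2)
--
--     output_bits = tuple(sorted((set(bits1) | set(bits2)) - {removed_bit}))
--     output_index = {bit: offset for offset, bit in enumerate(output_bits)}
--     output_rows: set[int] = set()
--
--     for row1 in rows1:
--         key = 0
--         for position, offset in enumerate(common_offsets1):
--             key |= ((row1 >> offset) & 1) << position
--
--         for row2 in buckets.get(key, ()):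
--             joined = 0
--             for bit in output_bits:
--                 if bit in index1:
--                     value = (row1 >> index1[bit]) & 1
--                 else:
--                     value = (row2 >> index2[bit]) & 1
--                 if value:
--                     joined |= 1 << output_index[bit]
--             output_rows.add(joined)
--
--     return output_bits, output_rows
-- ===== SOURCE B (Python) =====
-- from collections import defaultdict
--
--
-- def join_project_bit(
--     bits1: tuple[int, ...],
--     rows1: set[int],
--     bits2: tuple[int, ...],
--     rows2: set[int],
--     removed_bit: int,
-- ) -> tuple[tuple[int, ...], set[int]]:
--     index1 = {bit: offset for offset, bit in enumerate(bits1)}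
--     index2 = {bit: offset for offset, bit in enumerate(bits2)}
--     common_bits = sorted(set(bits1) & set(bits2))
--     common_offsets1 = [index1[bit] for bit in common_bits]
--     common_offsets2 = [index2[bit] for bit in common_bits]
--     output_bits = tuple(sorted((set(bits1) | set(bits2)) - {removed_bit}))
--     output_index = {bit: offset for offset, bit in enumerate(output_bits)}
--
--     # Precompute, once, where each output bit comes from: (target position, source offset).
--     src1 = [(output_index[b], index1[b]) for b in output_bits if b in index1]
--     src2 = [(output_index[b], index2[b]) for b in output_bits if b not in index1]
--
--     buckets: dict[int, list[int]] = defaultdict(list)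
--     for row2 in rows2:
--         key = 0
--         for position, offset in enumerate(common_offsets2):
--             key |= ((row2 >> offset) & 1) << position
--         proj = 0
--         for pos, off in src2:
--             proj |= ((row2 >> off) & 1) << pos
--         buckets[key].append(proj)
--
--     output_rows: set[int] = set()
--     for row1 in rows1:
--         key = 0
--         for position, offset in enumerate(common_offsets1):
--             key |= ((row1 >> offset) & 1) << position
--         proj = 0
--         for pos, off in src1:
--             proj |= ((row1 >> off) & 1) << pos
--         for proj2 in buckets.get(key, ()):
--             output_rows.add(proj | proj2)
--
--     return output_bits, output_rows
-- ===== Notes on version B (the rewrite author's own statement) =====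
-- stated objective: faster
-- what changed: Instead of A's inner loop over every output bit for every matched (row1,row2) pair, B precomputes each row's projection into output-index space once per row (and stores projected rows in the hash buckets), so each matched pair costs a single OR.
import Mathlib
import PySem

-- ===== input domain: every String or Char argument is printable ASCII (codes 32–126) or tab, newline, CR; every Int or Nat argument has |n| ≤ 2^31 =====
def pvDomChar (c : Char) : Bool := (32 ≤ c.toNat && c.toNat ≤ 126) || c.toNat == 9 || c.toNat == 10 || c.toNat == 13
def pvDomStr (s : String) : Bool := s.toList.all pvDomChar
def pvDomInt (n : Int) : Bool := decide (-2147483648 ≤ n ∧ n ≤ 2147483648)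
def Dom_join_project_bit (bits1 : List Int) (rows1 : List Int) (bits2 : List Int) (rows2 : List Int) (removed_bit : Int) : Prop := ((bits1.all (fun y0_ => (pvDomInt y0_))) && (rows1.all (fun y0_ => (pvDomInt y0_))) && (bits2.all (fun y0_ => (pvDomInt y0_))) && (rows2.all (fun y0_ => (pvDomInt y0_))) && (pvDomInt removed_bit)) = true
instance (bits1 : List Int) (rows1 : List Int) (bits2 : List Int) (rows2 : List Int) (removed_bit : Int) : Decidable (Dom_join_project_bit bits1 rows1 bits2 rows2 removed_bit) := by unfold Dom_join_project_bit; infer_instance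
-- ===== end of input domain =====

-- B precomputes each row's projection into output-index space once and ORs two precomputed
-- words per matched pair, instead of A's per-pair loop over all output bits (objective: faster).
-- The returned row collection is a Python set in both programs, so only its set of elements is
-- significant; both ports build it in the same insertion order.

-- ===== PORT A =====
-- Dict lookups `index1[bit]` etc. are ported as `getD _ 0`; the key is always present
-- where A performs the lookup, so the default is never used (KeyError is unreachable).
def join_project_bit (bits1 : List Int) (rows1 : List Int) (bits2 : List Int) (rows2 : List Int) (removed_bit : Int) : List Int × List Int :=
  let index1 : PySem.Dict Int Int :=
    (PySem.List.enumerate bits1 0).foldl (fun d p => d.insert p.2 p.1) PySem.Dict.empty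
  let index2 : PySem.Dict Int Int :=
    (PySem.List.enumerate bits2 0).foldl (fun d p => d.insert p.2 p.1) PySem.Dict.empty
  let common_bits :=
    PySem.List.sorted (PySem.Set.inter (PySem.Set.ofList bits1) (PySem.Set.ofList bits2)) (fun x => x) false
  let common_offsets1 := common_bits.map (fun b => index1.getD b 0)
  let common_offsets2 := common_bits.map (fun b => index2.getD b 0)
  let buckets : PySem.Dict Int (List Int) :=
    rows2.foldl (fun bk (row2 : Int) =>
      let key := (PySem.List.enumerate common_offsets2 0).foldl
        (fun k po => PySem.Int.bor k (PySem.Int.band (row2 >>> po.2.toNat) 1 <<< po.1.toNat)) 0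
      bk.modify key [] (fun l => l ++ [row2])) PySem.Dict.empty
  let output_bits :=
    PySem.List.sorted (PySem.Set.diff (PySem.Set.union (PySem.Set.ofList bits1) (PySem.Set.ofList bits2)) [removed_bit]) (fun x => x) false
  let output_index : PySem.Dict Int Int :=
    (PySem.List.enumerate output_bits 0).foldl (fun d p => d.insert p.2 p.1) PySem.Dict.empty
  let output_rows : PySem.Set Int :=
    rows1.foldl (fun out (row1 : Int) =>
      let key := (PySem.List.enumerate common_offsets1 0).foldl
        (fun k po => PySem.Int.bor k (PySem.Int.band (row1 >>> po.2.toNat) 1 <<< po.1.toNat)) 0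
      (buckets.getD key []).foldl (fun out (row2 : Int) =>
        let joined := output_bits.foldl (fun j bit =>
          let v := if index1.contains bit
                   then PySem.Int.band (row1 >>> (index1.getD bit 0).toNat) 1
                   else PySem.Int.band (row2 >>> (index2.getD bit 0).toNat) 1
          if v ≠ 0 then PySem.Int.bor j ((1 : Int) <<< (output_index.getD bit 0).toNat) else j) 0
        PySem.Set.add out joined) out) PySem.Set.empty
  (output_bits, output_rows)

-- ===== PORT B =====
def join_project_bit_alt (bits1 : List Int) (rows1 : List Int) (bits2 : List Int) (rows2 : List Int) (removed_bit : Int) : List Int × List Int :=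
  let index1 : PySem.Dict Int Int :=
    (PySem.List.enumerate bits1 0).foldl (fun d p => d.insert p.2 p.1) PySem.Dict.empty
  let index2 : PySem.Dict Int Int :=
    (PySem.List.enumerate bits2 0).foldl (fun d p => d.insert p.2 p.1) PySem.Dict.empty
  let common_bits :=
    PySem.List.sorted (PySem.Set.inter (PySem.Set.ofList bits1) (PySem.Set.ofList bits2)) (fun x => x) false
  let common_offsets1 := common_bits.map (fun b => index1.getD b 0)
  let common_offsets2 := common_bits.map (fun b => index2.getD b 0)
  let output_bits :=
    PySem.List.sorted (PySem.Set.diff (PySem.Set.union (PySem.Set.ofList bits1) (PySem.Set.ofList bits2)) [removed_bit]) (fun x => x) false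
  let output_index : PySem.Dict Int Int :=
    (PySem.List.enumerate output_bits 0).foldl (fun d p => d.insert p.2 p.1) PySem.Dict.empty
  -- where each output bit comes from: (target position, source offset), computed once
  let src1 := (output_bits.filter (fun b => index1.contains b)).map
    (fun b => (output_index.getD b 0, index1.getD b 0))
  let src2 := (output_bits.filter (fun b => !(index1.contains b))).map
    (fun b => (output_index.getD b 0, index2.getD b 0))
  let buckets : PySem.Dict Int (List Int) :=
    rows2.foldl (fun bk (row2 : Int) =>
      let key := (PySem.List.enumerate common_offsets2 0).foldl
        (fun k po => PySem.Int.bor k (PySem.Int.band (row2 >>> po.2.toNat) 1 <<< po.1.toNat)) 0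
      let proj := src2.foldl
        (fun (p : Int) (q : Int × Int) => PySem.Int.bor p (PySem.Int.band (row2 >>> q.2.toNat) 1 <<< q.1.toNat)) 0
      bk.modify key [] (fun l => l ++ [proj])) PySem.Dict.empty
  let output_rows : PySem.Set Int :=
    rows1.foldl (fun out (row1 : Int) =>
      let key := (PySem.List.enumerate common_offsets1 0).foldl
        (fun k po => PySem.Int.bor k (PySem.Int.band (row1 >>> po.2.toNat) 1 <<< po.1.toNat)) 0
      let proj := src1.foldl
        (fun (p : Int) (q : Int × Int) => PySem.Int.bor p (PySem.Int.band (row1 >>> q.2.toNat) 1 <<< q.1.toNat)) 0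
      (buckets.getD key []).foldl (fun out (proj2 : Int) =>
        PySem.Set.add out (PySem.Int.bor proj proj2)) out) PySem.Set.empty
  (output_bits, output_rows)

-- ===== PRECONDITION & SPEC =====
def Spec_join_project_bit (bits1 : List Int) (rows1 : List Int) (bits2 : List Int) (rows2 : List Int) (removed_bit : Int) (out : List Int × List Int) : Prop := out = join_project_bit_alt bits1 rows1 bits2 rows2 removed_bit
instance (bits1 : List Int) (rows1 : List Int) (bits2 : List Int) (rows2 : List Int) (removed_bit : Int) (out : List Int × List Int) : Decidable (Spec_join_project_bit bits1 rows1 bits2 rows2 removed_bit out) := by unfold Spec_join_project_bit; infer_instance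

-- ===== CLAIM (what is proved, stated in full; the proofs are below) =====
def Claim_equal_join_project_bit : Prop := ∀ (bits1 : List Int) (rows1 : List Int) (bits2 : List Int) (rows2 : List Int) (removed_bit : Int), Dom_join_project_bit bits1 rows1 bits2 rows2 removed_bit → Spec_join_project_bit bits1 rows1 bits2 rows2 removed_bit (join_project_bit bits1 rows1 bits2 rows2 removed_bit)

-- ===== LEMMAS AND PROOFS =====

-- (x & 1) is a bit
theorem pv_band_one_cases (x : Int) : PySem.Int.band x 1 = 0 ∨ PySem.Int.band x 1 = 1 := by
  rw [PySem.Int.band_one]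
  have h : PySem.Int.mod x 2 = x % 2 := by simp [pysem]
  rw [h]; exact Int.emod_two_eq x

theorem pv_bor_nonneg {a b : Int} (ha : 0 ≤ a) (hb : 0 ≤ b) : 0 ≤ PySem.Int.bor a b := by
  rw [PySem.Int.bor_of_nonneg ha hb]; exact Int.natCast_nonneg _

theorem pv_bor_assoc {a b c : Int} (ha : 0 ≤ a) (hb : 0 ≤ b) (hc : 0 ≤ c) :
    PySem.Int.bor (PySem.Int.bor a b) c = PySem.Int.bor a (PySem.Int.bor b c) := by
  rw [PySem.Int.bor_of_nonneg ha hb, PySem.Int.bor_of_nonneg hb hc,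
    PySem.Int.bor_of_nonneg (Int.natCast_nonneg _) hc,
    PySem.Int.bor_of_nonneg ha (Int.natCast_nonneg _)]
  simp [Nat.lor_assoc]

theorem pv_bor_right_comm {a b c : Int} (ha : 0 ≤ a) (hb : 0 ≤ b) (hc : 0 ≤ c) :
    PySem.Int.bor (PySem.Int.bor a b) c = PySem.Int.bor (PySem.Int.bor a c) b := by
  rw [pv_bor_assoc ha hb hc, pv_bor_assoc ha hc hb, PySem.Int.bor_comm b c]

theorem pv_shiftLeft_nonneg {v : Int} (hv : 0 ≤ v) (k : Nat) : 0 ≤ v <<< k := by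
  rw [Int.shiftLeft_eq]; positivity

-- the bit contribution of one output bit, as a single OR term
theorem pv_step_or (j v : Int) (k : Nat) (hv : v = 0 ∨ v = 1) :
    (if v ≠ 0 then PySem.Int.bor j (1 <<< k) else j) = PySem.Int.bor j (v <<< k) := by
  rcases hv with h | h <;> subst h <;> simp [PySem.Int.bor_zero]

-- folding OR over a list splits along any partition of the list
theorem pv_foldl_bor_partition {α : Type} (p : α → Bool) (F : α → Int) (hF : ∀ x, 0 ≤ F x) :
    ∀ (l : List α) (a b : Int), 0 ≤ a → 0 ≤ b →
      l.foldl (fun j x => PySem.Int.bor j (F x)) (PySem.Int.bor a b)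
        = PySem.Int.bor ((l.filter p).foldl (fun j x => PySem.Int.bor j (F x)) a)
            ((l.filter (fun x => !p x)).foldl (fun j x => PySem.Int.bor j (F x)) b)
  | [], a, b, _, _ => rfl
  | x :: l, a, b, ha, hb => by
    by_cases hp : p x
    · simp only [List.foldl_cons, List.filter_cons, hp, Bool.not_true, if_true]
      rw [pv_bor_right_comm ha hb (hF x)]
      exact pv_foldl_bor_partition p F hF l (PySem.Int.bor a (F x)) b
        (pv_bor_nonneg ha (hF x)) hb
    · simp only [List.foldl_cons, List.filter_cons, hp, Bool.not_false] 
      simp only [if_false, if_true, Bool.false_eq_true]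
      rw [pv_bor_assoc ha hb (hF x)]
      exact pv_foldl_bor_partition p F hF l a (PySem.Int.bor b (F x))
        ha (pv_bor_nonneg hb (hF x))

-- A's per-pair loop over all output bits equals the OR of the two precomputed projections
theorem pv_joined_eq (output_bits : List Int) (index1 index2 output_index : PySem.Dict Int Int)
    (row1 row2 : Int) :
    output_bits.foldl (fun j bit =>
      let v := if index1.contains bit
               then PySem.Int.band (row1 >>> (index1.getD bit 0).toNat) 1
               else PySem.Int.band (row2 >>> (index2.getD bit 0).toNat) 1
      if v ≠ 0 then PySem.Int.bor j ((1 : Int) <<< (output_index.getD bit 0).toNat) else j) 0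
    = PySem.Int.bor
        (((output_bits.filter (fun b => index1.contains b)).map
            (fun b => (output_index.getD b 0, index1.getD b 0))).foldl
          (fun (p : Int) (q : Int × Int) => PySem.Int.bor p (PySem.Int.band (row1 >>> q.2.toNat) 1 <<< q.1.toNat)) 0)
        (((output_bits.filter (fun b => !(index1.contains b))).map
            (fun b => (output_index.getD b 0, index2.getD b 0))).foldl
          (fun (p : Int) (q : Int × Int) => PySem.Int.bor p (PySem.Int.band (row2 >>> q.2.toNat) 1 <<< q.1.toNat)) 0) := by
  have hv : ∀ (r : Int) (d : PySem.Dict Int Int) (b : Int),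
      PySem.Int.band (r >>> (d.getD b 0).toNat) 1 = 0 ∨
      PySem.Int.band (r >>> (d.getD b 0).toNat) 1 = 1 := fun r d b => pv_band_one_cases _
  -- the merged per-bit OR term
  set F : Int → Int := fun bit =>
    (if index1.contains bit
     then PySem.Int.band (row1 >>> (index1.getD bit 0).toNat) 1
     else PySem.Int.band (row2 >>> (index2.getD bit 0).toNat) 1) <<< (output_index.getD bit 0).toNat
    with hF_def
  have hF : ∀ b, 0 ≤ F b := by
    intro b
    apply pv_shiftLeft_nonneg
    by_cases h : index1.contains b <;> simp only [h, if_true, if_false, Bool.false_eq_true] <;>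
      rcases hv _ _ b with h' | h' <;> rw [h'] <;> norm_num
  have hstep : output_bits.foldl (fun j bit =>
      let v := if index1.contains bit
               then PySem.Int.band (row1 >>> (index1.getD bit 0).toNat) 1
               else PySem.Int.band (row2 >>> (index2.getD bit 0).toNat) 1
      if v ≠ 0 then PySem.Int.bor j ((1 : Int) <<< (output_index.getD bit 0).toNat) else j) 0
      = output_bits.foldl (fun j bit => PySem.Int.bor j (F bit)) 0 := by
    apply PySem.List.foldl_congr_mem
    intro acc b _
    simp only [hF_def]
    by_cases h : index1.contains b <;>
      simp only [h, if_true, if_false, Bool.false_eq_true] <;>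
      exact pv_step_or acc _ _ (pv_band_one_cases _)
  rw [hstep]
  have hpart := pv_foldl_bor_partition (fun b => index1.contains b) F hF output_bits 0 0 le_rfl le_rfl
  rw [PySem.Int.bor_zero] at hpart
  rw [hpart]
  congr 1
  · rw [List.foldl_map]
    apply PySem.List.foldl_congr_mem
    intro acc b hb
    have hmem := List.of_mem_filter hb
    simp only [hF_def, hmem, if_true]
  · rw [List.foldl_map]
    apply PySem.List.foldl_congr_mem
    intro acc b hb
    have hmem := List.of_mem_filter hb
    cases hcb : index1.contains b with
    | true => simp [hcb] at hmem
    | false => simp only [hF_def, hcb, Bool.false_eq_true, if_false]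

-- B's buckets hold exactly the projections of A's buckets, bucket by bucket
theorem pv_buckets_map (key proj : Int → Int) :
    ∀ (rows : List Int) (dA dB : PySem.Dict Int (List Int)),
      (∀ k, dB.getD k [] = (dA.getD k []).map proj) →
      ∀ k, (rows.foldl (fun d r => d.modify (key r) [] (fun l => l ++ [proj r])) dB).getD k []
        = ((rows.foldl (fun d r => d.modify (key r) [] (fun l => l ++ [r])) dA).getD k []).map proj
  | [], _, _, h, k => h k
  | r :: rows, dA, dB, h, k => by
    simp only [List.foldl_cons]
    apply pv_buckets_map key proj rows
    intro k'
    rw [PySem.Dict.getD_modify, PySem.Dict.getD_modify]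
    by_cases hk : k' = key r
    · simp [hk, h (key r), List.map_append]
    · simp [hk, h k']

-- the whole row loop: A's pair-wise join loop equals B's loop over precomputed projections
theorem pv_second_eq (rows1 rows2 : List Int) (key1 key2 : Int → Int)
    (jA : Int → Int → Int) (p1 p2 : Int → Int)
    (hj : ∀ r1 r2, jA r1 r2 = PySem.Int.bor (p1 r1) (p2 r2)) :
    rows1.foldl (fun out row1 =>
      ((rows2.foldl (fun d r => d.modify (key2 r) [] (fun l => l ++ [r])) PySem.Dict.empty).getD
          (key1 row1) []).foldl
        (fun out row2 => PySem.Set.add out (jA row1 row2)) out) PySem.Set.empty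
    = rows1.foldl (fun out row1 =>
      ((rows2.foldl (fun d r => d.modify (key2 r) [] (fun l => l ++ [p2 r])) PySem.Dict.empty).getD
          (key1 row1) []).foldl
        (fun out q => PySem.Set.add out (PySem.Int.bor (p1 row1) q)) out) PySem.Set.empty := by
  have hb : ∀ k, (rows2.foldl (fun d r => d.modify (key2 r) [] (fun l => l ++ [p2 r]))
        PySem.Dict.empty).getD k []
      = ((rows2.foldl (fun d r => d.modify (key2 r) [] (fun l => l ++ [r]))
        PySem.Dict.empty).getD k []).map p2 := by
    apply pv_buckets_map key2 p2 rows2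
    intro k; simp [pysem]
  apply PySem.List.foldl_congr_mem
  intro out row1 _
  rw [hb (key1 row1), List.foldl_map]
  apply PySem.List.foldl_congr_mem
  intro acc r2 _
  rw [hj row1 r2]

-- ===== VERDICT (by name: the statement is the Claim_ definition above) =====
theorem join_project_bit_spec : Claim_equal_join_project_bit := by
  intro bits1 rows1 bits2 rows2 removed_bit _
  unfold Spec_join_project_bit join_project_bit join_project_bit_alt
  refine congrArg _ (pv_second_eq rows1 rows2 _ _ _ _ _ ?_)
  intro r1 r2
  exact pv_joined_eq _ _ _ _ r1 r2
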